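-- pv_equiv track=rewrite | github.com/czlll/OpenHands | openhands/repo_index/repository.py | remove_duplicate_lines
-- ===== SOURCE A (Python) =====
-- def remove_duplicate_lines(replacement_lines, original_lines):
--     """
--     Removes overlapping lines at the end of replacement_lines that match the beginning of original_lines.
--     """
--     if not replacement_lines or not original_lines:
--         return replacement_lines
--
--     max_overlap = min(len(replacement_lines), len(original_lines))
--
--     for overlap in range(max_overlap, 0, -1):
--         if replacement_lines[-overlap:] == original_lines[:overlap]:
--             return replacement_lines[:-overlap]
--
--     return replacement_lines
-- ===== SOURCE B (Python) =====
-- def remove_duplicate_lines(replacement_lines, original_lines):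
--     """
--     Removes overlapping lines at the end of replacement_lines that match the beginning of original_lines.
--     KMP prefix function on original + sentinel + replacement: the last value is the
--     longest suffix of replacement_lines that is a prefix of original_lines (O(n+m)).
--     """
--     if not replacement_lines or not original_lines:
--         return replacement_lines
--     sentinel = object()  # matches nothing
--     text = original_lines + [sentinel] + replacement_lines
--     pi = [0] * len(text)
--     k = 0
--     for i in range(1, len(text)):
--         while k > 0 and text[i] != text[k]:
--             k = pi[k - 1]
--         if text[i] == text[k]:
--             k += 1
--         pi[i] = k
--     k = pi[-1]
--     if k == 0:
--         return replacement_lines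
--     return replacement_lines[:-k]
-- ===== Notes on version B (the rewrite author's own statement) =====
-- stated objective: faster
-- what changed: Replaces the descending loop of O(n) slice comparisons with the KMP prefix function computed over original + sentinel + replacement, whose last value is the longest suffix-of-replacement/prefix-of-original overlap.
import Mathlib
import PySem

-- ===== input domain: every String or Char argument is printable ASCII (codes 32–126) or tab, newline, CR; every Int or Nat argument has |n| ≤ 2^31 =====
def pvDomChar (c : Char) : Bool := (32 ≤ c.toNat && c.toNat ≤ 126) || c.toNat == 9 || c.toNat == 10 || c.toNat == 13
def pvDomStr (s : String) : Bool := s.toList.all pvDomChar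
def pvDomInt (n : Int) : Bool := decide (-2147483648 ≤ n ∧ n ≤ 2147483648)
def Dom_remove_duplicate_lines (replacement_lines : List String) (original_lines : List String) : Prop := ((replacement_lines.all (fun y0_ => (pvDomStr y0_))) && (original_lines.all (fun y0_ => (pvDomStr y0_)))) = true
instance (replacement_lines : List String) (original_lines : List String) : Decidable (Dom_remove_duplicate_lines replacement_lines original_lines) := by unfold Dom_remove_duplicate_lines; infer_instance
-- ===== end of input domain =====

-- B replaces A's descending loop of slice comparisons by the KMP prefix function
-- over original + sentinel + replacement, computed in a single pass.

-- ===== PORT A =====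
-- the `for overlap in range(max_overlap, 0, -1)` loop, recursing downwards
def rdlLoop (replacement_lines : List String) (original_lines : List String) : Nat → List String
  | 0 => replacement_lines
  | k+1 =>
    if PySem.List.slice replacement_lines (some (-((k+1 : Nat) : Int))) none
        = PySem.List.slice original_lines none (some ((k+1 : Nat) : Int))
    then PySem.List.slice replacement_lines none (some (-((k+1 : Nat) : Int)))
    else rdlLoop replacement_lines original_lines k

def remove_duplicate_lines (replacement_lines : List String) (original_lines : List String) : List String :=
  if replacement_lines = [] ∨ original_lines = [] then replacement_lines
  else rdlLoop replacement_lines original_lines (min replacement_lines.length original_lines.length)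

-- ===== PORT B =====
-- the `while k > 0 and text[i] != text[k]: k = pi[k-1]` loop; fuel = k iterations always
-- suffice because every stored pi entry is below its index + 1 (a totality guard only)
def kmpFall (t : List (Option String)) (pi : List Nat) (c : Option String) : Nat → Nat → Nat
  | _, 0 => 0
  | 0, k+1 => k+1
  | fuel+1, k+1 =>
    if c = t.getD (k+1) none then k+1
    else kmpFall t pi c fuel (pi.getD k 0)

-- one iteration of the `for i in range(1, len(text))` body, returning the new k (= pi[i])
def kmpStep (t : List (Option String)) (pi : List Nat) (c : Option String) (k : Nat) : Nat :=
  let k' := kmpFall t pi c k k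
  if c = t.getD k' none then k' + 1 else k'

-- the whole prefix-function loop; state = (pi entries appended so far, current k)
def kmpPis (t : List (Option String)) : List Nat :=
  ((List.range (t.length - 1)).foldl
    (fun (st : List Nat × Nat) i =>
      let k := kmpStep t st.1 (t.getD (i+1) none) st.2
      (st.1 ++ [k], k))
    ([0], 0)).1

def remove_duplicate_lines_alt (replacement_lines : List String) (original_lines : List String) : List String :=
  if replacement_lines = [] ∨ original_lines = [] then replacement_lines
  else
    -- the sentinel `object()` matches nothing: encoded as `none`, the lines as `some _`
    let text := original_lines.map some ++ [none] ++ replacement_lines.map some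
    let k := (kmpPis text).getLastD 0
    if k = 0 then replacement_lines
    else PySem.List.slice replacement_lines none (some (-(k : Int)))

-- ===== PRECONDITION & SPEC =====
def Spec_remove_duplicate_lines (replacement_lines : List String) (original_lines : List String) (out : List String) : Prop := out = remove_duplicate_lines_alt replacement_lines original_lines
instance (replacement_lines : List String) (original_lines : List String) (out : List String) : Decidable (Spec_remove_duplicate_lines replacement_lines original_lines out) := by unfold Spec_remove_duplicate_lines; infer_instance

-- ===== CLAIM (what is proved, stated in full; the proofs are below) =====
def Claim_equal_remove_duplicate_lines : Prop := ∀ (replacement_lines : List String) (original_lines : List String), Dom_remove_duplicate_lines replacement_lines original_lines → Spec_remove_duplicate_lines replacement_lines original_lines (remove_duplicate_lines replacement_lines original_lines)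

-- ===== LEMMAS AND PROOFS =====

-- equation lemmas for kmpFall
lemma kmpFall_zero (t : List (Option String)) (pi : List Nat) (c : Option String) (fuel : Nat) :
    kmpFall t pi c fuel 0 = 0 := by cases fuel <;> rfl

lemma kmpFall_succ (t : List (Option String)) (pi : List Nat) (c : Option String) (fuel k : Nat) :
    kmpFall t pi c (fuel+1) (k+1) =
      if c = t.getD (k+1) none then k+1 else kmpFall t pi c fuel (pi.getD k 0) := rfl

-- `k` is a proper border of `s`: a length-k suffix of s that is also a prefix
def Brd (s : List (Option String)) (k : Nat) : Prop :=
  k < s.length ∧ s.take k = s.drop (s.length - k)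

-- the longest proper border (the value KMP's pi stores for the prefix s)
def piSpec (s : List (Option String)) : Nat :=
  Nat.findGreatest (fun k => s.take k = s.drop (s.length - k)) (s.length - 1)

lemma brd_zero (s : List (Option String)) (h : s ≠ []) : Brd s 0 :=
  ⟨List.length_pos_iff.mpr h, by simp⟩

lemma piSpec_lt (s : List (Option String)) (h : s ≠ []) : piSpec s < s.length := by
  have h1 : 0 < s.length := List.length_pos_iff.mpr h
  have h2 := Nat.findGreatest_le (P := fun k => s.take k = s.drop (s.length - k)) (s.length - 1)
  unfold piSpec
  omega

lemma piSpec_brd (s : List (Option String)) (h : s ≠ []) : Brd s (piSpec s) := by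
  refine ⟨piSpec_lt s h, ?_⟩
  by_cases h0 : piSpec s = 0
  · rw [h0]; simp
  · exact Nat.findGreatest_of_ne_zero
      (P := fun k => s.take k = s.drop (s.length - k)) (n := s.length - 1) rfl h0

lemma brd_le_piSpec (s : List (Option String)) (b : Nat) (hb : Brd s b) : b ≤ piSpec s :=
  Nat.le_findGreatest (by have := hb.1; omega) hb.2

lemma piSpec_eq_of (s : List (Option String)) (r : Nat) (h1 : Brd s r)
    (h2 : ∀ b, Brd s b → b ≤ r) : piSpec s = r := by
  have hne : s ≠ [] := by
    intro e
    rw [e] at h1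
    simp [Brd] at h1
  exact le_antisymm (h2 _ (piSpec_brd s hne)) (brd_le_piSpec s r h1)

lemma getD_of_lt (s : List (Option String)) (n : Nat) (d : Option String) (h : n < s.length) :
    s.getD n d = s[n] := by
  simp [List.getD_eq_getElem?_getD, List.getElem?_eq_getElem h]

lemma getD_take (t : List (Option String)) (i b : Nat) (hb : b < i) :
    (t.take i).getD b none = t.getD b none := by
  by_cases h : b < t.length
  · rw [getD_of_lt _ _ _ (by simp; omega), getD_of_lt _ _ _ h]
    simp
  · have h1 : (t.take i).length ≤ t.length := by simp
    rw [List.getD_eq_getElem?_getD, List.getD_eq_getElem?_getD,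
        List.getElem?_eq_none (by omega), List.getElem?_eq_none (by omega)]

lemma take_snoc (s : List (Option String)) (c : Option String) (k : Nat) (hk : k < s.length) :
    (s ++ [c]).take (k+1) = s.take k ++ [s.getD k none] := by
  have h1 : (s ++ [c]).take (k+1) = s.take (k+1) := List.take_append_of_le_length (by omega)
  have h2 : s.take (k+1) = s.take k ++ [s[k]] := by
    rw [List.take_succ, List.getElem?_eq_getElem hk]
    rfl
  calc (s ++ [c]).take (k+1) = s.take (k+1) := h1
    _ = s.take k ++ [s[k]] := h2
    _ = s.take k ++ [s.getD k none] := by rw [getD_of_lt _ _ _ hk]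

lemma drop_snoc (s : List (Option String)) (c : Option String) (k : Nat) (hk : k < s.length) :
    (s ++ [c]).drop ((s ++ [c]).length - (k+1)) = s.drop (s.length - k) ++ [c] := by
  have h1 : (s ++ [c]).length - (k+1) = s.length - k := by simp
  calc (s ++ [c]).drop ((s ++ [c]).length - (k+1)) = (s ++ [c]).drop (s.length - k) := by rw [h1]
    _ = s.drop (s.length - k) ++ [c] := List.drop_append_of_le_length (by omega)

-- border extension: borders of s ++ [c] of positive length
lemma brd_snoc (s : List (Option String)) (c : Option String) (k : Nat) :
    Brd (s ++ [c]) (k+1) ↔ Brd s k ∧ s.getD k none = c := by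
  constructor
  · rintro ⟨hlt, heq⟩
    have hk : k < s.length := by simp at hlt; omega
    rw [take_snoc s c k hk, drop_snoc s c k hk] at heq
    obtain ⟨h3, h4⟩ := List.append_inj' heq (by simp)
    simp only [List.cons.injEq, and_true] at h4
    exact ⟨⟨hk, h3⟩, h4⟩
  · rintro ⟨⟨hk, h3⟩, h4⟩
    refine ⟨by simp; omega, ?_⟩
    rw [take_snoc s c k hk, drop_snoc s c k hk, h3, h4]

-- borders below a border k of s are exactly the borders of s.take k
lemma brd_take (s : List (Option String)) (k j : Nat) (hk : Brd s k) (hj : j < k) :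
    Brd s j ↔ Brd (s.take k) j := by
  obtain ⟨hklt, hkeq⟩ := hk
  have hlen : (s.take k).length = k := by simp; omega
  have htt : (s.take k).take j = s.take j := by rw [List.take_take]; congr 1; omega
  have hdd : (s.take k).drop (k - j) = s.drop (s.length - j) := by
    rw [hkeq, List.drop_drop]; congr 1; omega
  constructor
  · rintro ⟨hjl, hjeq⟩
    refine ⟨by rw [hlen]; exact hj, ?_⟩
    rw [hlen, htt, hdd]
    exact hjeq
  · rintro ⟨hjl, hjeq⟩
    rw [hlen] at hjl
    rw [hlen, htt, hdd] at hjeq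
    exact ⟨by omega, hjeq⟩

lemma fall_spec (t : List (Option String)) (pi : List Nat) (i : Nat) (c : Option String)
    (hilen : i ≤ pi.length)
    (hpi : ∀ j, j < pi.length → pi.getD j 0 = piSpec (t.take (j+1))) :
    ∀ k fuel, k ≤ fuel → Brd (t.take i) k →
      (∀ b, Brd (t.take i) b → (t.take i).getD b none = c → b ≤ k) →
      Brd (t.take i) (kmpFall t pi c fuel k) ∧
      (∀ b, Brd (t.take i) b → (t.take i).getD b none = c → b ≤ kmpFall t pi c fuel k) ∧
      (kmpFall t pi c fuel k = 0 ∨ (t.take i).getD (kmpFall t pi c fuel k) none = c) := by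
  intro k
  induction k using Nat.strong_induction_on with
  | _ k IH =>
    intro fuel hfuel hbrd hmax
    match k, hbrd, hmax with
    | 0, hbrd, hmax =>
      rw [kmpFall_zero]
      exact ⟨hbrd, hmax, Or.inl rfl⟩
    | k'+1, hbrd, hmax =>
      cases fuel with
      | zero => omega
      | succ f =>
        have hklt : k'+1 < i := by
          have h1 := hbrd.1
          rw [List.length_take] at h1
          omega
        rw [kmpFall_succ]
        by_cases hc : c = t.getD (k'+1) none
        · rw [if_pos hc]
          refine ⟨hbrd, hmax, Or.inr ?_⟩
          rw [getD_take t i (k'+1) hklt]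
          exact hc.symm
        · rw [if_neg hc]
          have hk'pi : k' < pi.length := by omega
          have hk2 : pi.getD k' 0 = piSpec (t.take (k'+1)) := hpi k' hk'pi
          have htk : (t.take i).take (k'+1) = t.take (k'+1) := by
            rw [List.take_take]; congr 1; omega
          have hlt2 : k'+1 < t.length := by
            have h1 := hbrd.1
            rw [List.length_take] at h1
            omega
          have hlen' : (t.take (k'+1)).length = k'+1 := by
            rw [List.length_take]
            omega
          have htne : t.take (k'+1) ≠ [] := by
            intro e
            rw [e] at hlen'
            simp at hlen' 
          have hk2lt : pi.getD k' 0 < k'+1 := by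
            rw [hk2]
            have := piSpec_lt (t.take (k'+1)) htne
            omega
          have hbrd2 : Brd (t.take i) (pi.getD k' 0) := by
            have hb3 : Brd (t.take (k'+1)) (piSpec (t.take (k'+1))) := piSpec_brd _ htne
            have h4 := (brd_take (t.take i) (k'+1) (piSpec (t.take (k'+1))) hbrd
              (by rw [← hk2]; exact hk2lt)).mpr
            rw [htk] at h4
            rw [hk2]
            exact h4 hb3
          have hmax2 : ∀ b, Brd (t.take i) b → (t.take i).getD b none = c → b ≤ pi.getD k' 0 := by
            intro b hb hbc
            have hble : b ≤ k'+1 := hmax b hb hbc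
            have hbne : b ≠ k'+1 := by
              intro e
              rw [e, getD_take t i (k'+1) hklt] at hbc
              exact hc hbc.symm
            have hblt : b < k'+1 := by omega
            have hb2 : Brd (t.take (k'+1)) b := by
              rw [← htk]
              exact (brd_take (t.take i) (k'+1) b hbrd hblt).mp hb
            rw [hk2]
            exact brd_le_piSpec _ _ hb2
          exact IH (pi.getD k' 0) (by omega) f (by omega) hbrd2 hmax2

lemma step_spec (t : List (Option String)) (pi : List Nat) (i : Nat)
    (hi : 0 < i) (hlen : i < t.length) (hilen : i ≤ pi.length)
    (hpi : ∀ j, j < pi.length → pi.getD j 0 = piSpec (t.take (j+1))) :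
    kmpStep t pi (t.getD i none) (piSpec (t.take i)) = piSpec (t.take (i+1)) := by
  have hslen : (t.take i).length = i := by simp; omega
  have hsne : t.take i ≠ [] := by
    intro e
    rw [e] at hslen
    simp at hslen
    omega
  obtain ⟨hr_brd, hr_max, hr_m⟩ :=
    fall_spec t pi i (t.getD i none) hilen hpi (piSpec (t.take i)) (piSpec (t.take i)) le_rfl
      (piSpec_brd _ hsne) (fun b hb _ => brd_le_piSpec _ b hb)
  set c := t.getD i none with hc_def
  set r := kmpFall t pi c (piSpec (t.take i)) (piSpec (t.take i)) with hr_def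
  have hrlt : r < i := by
    have := hr_brd.1
    omega
  have hsnoc : t.take (i+1) = t.take i ++ [c] := by
    rw [List.take_succ, List.getElem?_eq_getElem hlen, hc_def, getD_of_lt _ _ _ hlen]
    rfl
  have hrd : (t.take i).getD r none = t.getD r none := getD_take t i r hrlt
  unfold kmpStep
  by_cases hc : c = t.getD r none
  · rw [← hr_def, if_pos hc]
    symm
    rw [hsnoc]
    apply piSpec_eq_of
    · exact (brd_snoc _ c r).mpr ⟨hr_brd, by rw [hrd]; exact hc.symm⟩
    · intro b hb
      match b, hb with
      | 0, _ => omega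
      | b'+1, hb =>
        obtain ⟨hb', hbc⟩ := (brd_snoc _ c b').mp hb
        have := hr_max b' hb' hbc
        omega
  · rw [← hr_def, if_neg hc]
    have hr0 : r = 0 := by
      rcases hr_m with h | h
      · exact h
      · rw [hrd] at h
        exact absurd h.symm hc
    symm
    rw [hsnoc, hr0]
    apply piSpec_eq_of
    · exact brd_zero _ (by simp)
    · intro b hb
      match b, hb with
      | 0, _ => omega
      | b'+1, hb =>
        exfalso
        obtain ⟨hb', hbc⟩ := (brd_snoc _ c b').mp hb
        have hble := hr_max b' hb' hbc
        have hb'0 : b' = 0 := by omega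
        subst hb'0
        rw [getD_take t i 0 hi] at hbc
        rw [hr0] at hc
        exact hc hbc.symm

lemma piSpec_take_one (t : List (Option String)) : piSpec (t.take 1) = 0 := by
  unfold piSpec
  have h : (t.take 1).length - 1 = 0 := by
    have : (t.take 1).length ≤ 1 := by simp
    omega
  rw [h]
  rfl

lemma getD_map_range (g : Nat → Nat) (N jj : Nat) (h : jj < N) :
    ((List.range N).map g).getD jj 0 = g jj := by
  rw [List.getD_eq_getElem?_getD, List.getElem?_eq_getElem (by simp [h])]
  simp

lemma kmpPis_fold (t : List (Option String)) (ht : t ≠ []) :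
    ∀ j, j ≤ t.length - 1 →
    ((List.range j).foldl
      (fun (st : List Nat × Nat) i =>
        let k := kmpStep t st.1 (t.getD (i+1) none) st.2
        (st.1 ++ [k], k))
      ([0], 0)) =
      ((List.range (j+1)).map (fun i => piSpec (t.take (i+1))), piSpec (t.take (j+1))) := by
  intro j
  induction j with
  | zero =>
    intro _
    simp [piSpec_take_one]
  | succ j IH =>
    intro hj
    have hlen : 0 < t.length := List.length_pos_iff.mpr ht
    rw [List.range_succ, List.foldl_append, IH (by omega)]
    simp only [List.foldl_cons, List.foldl_nil]
    have hstep : kmpStep t ((List.range (j+1)).map (fun i => piSpec (t.take (i+1))))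
        (t.getD (j+1) none) (piSpec (t.take (j+1))) = piSpec (t.take (j+2)) := by
      apply step_spec t _ (j+1) (by omega) (by omega) (by simp)
      intro jj hjj
      simp at hjj
      exact getD_map_range _ _ _ (by omega)
    rw [hstep]
    simp [List.range_succ]

lemma kmpPis_last (t : List (Option String)) (ht : t ≠ []) :
    (kmpPis t).getLastD 0 = piSpec t := by
  have hlen : 0 < t.length := List.length_pos_iff.mpr ht
  unfold kmpPis
  rw [kmpPis_fold t ht (t.length - 1) le_rfl]
  have h1 : t.length - 1 + 1 = t.length := by omega
  rw [h1]
  have h2 : List.range t.length = List.range (t.length - 1) ++ [t.length - 1] := by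
    conv_lhs => rw [← h1]
    rw [List.range_succ]
  rw [h2, List.map_append]
  simp only [List.map_cons, List.map_nil]
  rw [List.getLastD_concat]
  rw [h1]
  rw [List.take_length]

lemma map_some_inj : ∀ (a b : List String), a.map some = b.map some → a = b
  | [], [], _ => rfl
  | [], _::_, h => by simp at h
  | _::_, [], h => by simp at h
  | x::xs, y::ys, h => by
    simp only [List.map_cons, List.cons.injEq, Option.some.injEq] at h
    rw [h.1, map_some_inj xs ys h.2]

lemma take_text (o r : List String) (k : Nat) (hk : k ≤ o.length) :
    (o.map some ++ [none] ++ r.map some).take k = (o.take k).map some := by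
  rw [List.append_assoc, List.take_append_of_le_length (by simpa using hk), ← List.map_take]

lemma drop_text (o r : List String) (k : Nat) (hk : k ≤ r.length) :
    (o.map some ++ [none] ++ r.map some).drop (o.length + 1 + r.length - k)
      = (r.drop (r.length - k)).map some := by
  have h1 : o.length + 1 + r.length - k = (o.map some ++ [none]).length + (r.length - k) := by
    simp; omega
  rw [h1, List.drop_append, ← List.map_drop]
  simp

lemma map_some_ne_none (x : Option String) : Option.map some x ≠ some none := by
  cases x <;> simp

lemma text_none_iff (o r : List String) (j : Nat) :
    (o.map some ++ [none] ++ r.map some)[j]? = some none ↔ j = o.length := by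
  rcases Nat.lt_trichotomy j o.length with h | h | h
  · rw [List.getElem?_append_left (by simp; omega), List.getElem?_append_left (by simpa using h)]
    simp [List.getElem?_eq_getElem (by simpa using h)]
    omega
  · subst h
    rw [List.getElem?_append_left (by simp), List.getElem?_append_right (by simp)]
    simp
  · rw [List.getElem?_append_right (by simp; omega), List.getElem?_map]
    constructor
    · intro hmap
      exact absurd hmap (map_some_ne_none _)
    · intro hj
      exact absurd hj (by omega)

lemma brd_text_le (o r : List String) (k : Nat)
    (hb : Brd (o.map some ++ [none] ++ r.map some) k) : k ≤ min r.length o.length := by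
  obtain ⟨hlt, heq⟩ := hb
  set t := o.map some ++ [none] ++ r.map some with ht_def
  have hlen : t.length = o.length + 1 + r.length := by
    simp [ht_def]
    omega
  have hkn : k ≤ o.length := by
    by_cases hgt' : k ≤ o.length
    · exact hgt'
    have hgt : o.length < k := by omega
    exfalso
    have h1 := congrArg (fun l => l[o.length]?) heq
    simp only at h1
    rw [List.getElem?_take_of_lt hgt, List.getElem?_drop] at h1
    have h2 : t[o.length]? = some none := (text_none_iff o r o.length).mpr rfl
    rw [h2] at h1
    have h3 := (text_none_iff o r _).mp h1.symm
    omega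
  refine le_min ?_ hkn
  by_cases hgt' : k ≤ r.length
  · exact hgt'
  exfalso
  have hgt : r.length < k := by omega
  have h1 := congrArg (fun l => l[k - r.length - 1]?) heq
  simp only at h1
  rw [List.getElem?_take_of_lt (by omega), List.getElem?_drop] at h1
  have h2 : t.length - k + (k - r.length - 1) = o.length := by omega
  rw [h2] at h1
  have h3 : t[k - r.length - 1]? = some none := by
    rw [h1]
    exact (text_none_iff o r o.length).mpr rfl
  have h4 := (text_none_iff o r _).mp h3
  omega

lemma brd_text (r o : List String) (k : Nat) :
    Brd (o.map some ++ [none] ++ r.map some) k ↔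
      (k ≤ min r.length o.length ∧ r.drop (r.length - k) = o.take k) := by
  set t := o.map some ++ [none] ++ r.map some with ht_def
  have hlen : t.length = o.length + 1 + r.length := by
    simp [ht_def]
    omega
  constructor
  · intro hb
    have hle := brd_text_le o r k hb
    obtain ⟨hlt, heq⟩ := hb
    refine ⟨hle, ?_⟩
    rw [show t.length - k = o.length + 1 + r.length - k from by omega] at heq
    rw [take_text o r k (by omega), drop_text o r k (by omega)] at heq
    exact (map_some_inj _ _ heq.symm)
  · rintro ⟨hle, heq⟩
    refine ⟨by omega, ?_⟩
    rw [show t.length - k = o.length + 1 + r.length - k from by omega]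
    rw [take_text o r k (by omega), drop_text o r k (by omega), heq]

lemma piSpec_text (r o : List String) :
    piSpec (o.map some ++ [none] ++ r.map some) =
      Nat.findGreatest (fun k => r.drop (r.length - k) = o.take k ∧ 0 < k)
        (min r.length o.length) := by
  set t := o.map some ++ [none] ++ r.map some with ht_def
  have htne : t ≠ [] := by simp [ht_def]
  set KA := Nat.findGreatest (fun k => r.drop (r.length - k) = o.take k ∧ 0 < k)
    (min r.length o.length) with hKA_def
  have h1 : KA ≤ piSpec t := by
    by_cases hKA : KA = 0
    · omega
    · have hQ := Nat.findGreatest_of_ne_zero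
        (P := fun k => r.drop (r.length - k) = o.take k ∧ 0 < k) hKA_def.symm hKA
      have hle : KA ≤ min r.length o.length := hKA_def ▸ Nat.findGreatest_le _
      exact brd_le_piSpec _ _ ((brd_text r o KA).mpr ⟨hle, hQ.1⟩)
  have h2 : piSpec t ≤ KA := by
    by_cases hP : piSpec t = 0
    · omega
    · obtain ⟨hle, heq⟩ := (brd_text r o _).mp (piSpec_brd t htne)
      exact Nat.le_findGreatest hle ⟨heq, Nat.pos_of_ne_zero hP⟩
  omega

lemma rdlLoop_eq (r o : List String) :
    ∀ j, rdlLoop r o j =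
      (if Nat.findGreatest (fun k => r.drop (r.length - k) = o.take k ∧ 0 < k) j = 0
       then r
       else r.take (r.length - Nat.findGreatest
         (fun k => r.drop (r.length - k) = o.take k ∧ 0 < k) j)) := by
  intro j
  induction j with
  | zero => simp [rdlLoop]
  | succ j IH =>
    show (if PySem.List.slice r (some (-((j+1 : Nat) : Int))) none
        = PySem.List.slice o none (some ((j+1 : Nat) : Int))
      then PySem.List.slice r none (some (-((j+1 : Nat) : Int)))
      else rdlLoop r o j) = _
    rw [PySem.List.slice_from_neg_natCast r (j+1) (by omega),
        PySem.List.slice_to_natCast o (j+1),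
        PySem.List.slice_to_neg_natCast r (j+1) (by omega)]
    simp only [Nat.findGreatest_succ]
    by_cases hP : r.drop (r.length - (j+1)) = o.take (j+1)
    · rw [if_pos hP,
        if_pos (show r.drop (r.length - (j+1)) = o.take (j+1) ∧ 0 < j+1 from ⟨hP, Nat.succ_pos j⟩),
        if_neg (Nat.succ_ne_zero j)]
    · rw [if_neg hP,
        if_neg (show ¬(r.drop (r.length - (j+1)) = o.take (j+1) ∧ 0 < j+1) from fun h => hP h.1),
        IH]

-- ===== VERDICT (by name: the statement is the Claim_ definition above) =====
theorem remove_duplicate_lines_spec : Claim_equal_remove_duplicate_lines := by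
  intro r o _
  unfold Spec_remove_duplicate_lines remove_duplicate_lines remove_duplicate_lines_alt
  by_cases h : r = [] ∨ o = []
  · rw [if_pos h, if_pos h]
  · rw [if_neg h, if_neg h]
    obtain ⟨hr, ho⟩ := not_or.mp h
    show rdlLoop r o (min r.length o.length) =
      (if (kmpPis (o.map some ++ [none] ++ r.map some)).getLastD 0 = 0 then r
       else PySem.List.slice r none
         (some (-(((kmpPis (o.map some ++ [none] ++ r.map some)).getLastD 0 : Nat) : Int))))
    have htne : (o.map some ++ [none] ++ r.map some : List (Option String)) ≠ [] := by simp
    rw [kmpPis_last _ htne, piSpec_text r o, rdlLoop_eq r o (min r.length o.length)]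
    set KA := Nat.findGreatest (fun k => r.drop (r.length - k) = o.take k ∧ 0 < k)
      (min r.length o.length) with hKA_def
    by_cases hz : KA = 0
    · rw [if_pos hz, if_pos hz]
    · rw [if_neg hz, if_neg hz, PySem.List.slice_to_neg_natCast r KA (by omega)]
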